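-- pv_equiv track=rewrite | github.com/taylorreece/code_competitions | facebook-hacker-cup/2017/round1a/3/solution.py | solve
-- ===== SOURCE A (Python) =====
-- def even(x):
--     return x % 2 == 0
--
-- def odd(x):
--     return not even(x)
--
-- def solve(N, K):
--     if K == 1:
--         if N % 2:
--             return (N//2, N//2)
--         else:
--             return (N//2, N//2-1)
--     if even(N) and odd(K):
--         new_N = N // 2 - 1
--         new_K = K // 2
--     if odd(N) and odd(K):
--         new_N = N // 2
--         new_K = K // 2
--     if even(N) and even(K):
--         new_N = N // 2
--         new_K = K // 2
--     if odd(N) and even(K):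
--         new_N = N // 2
--         new_K = K // 2
--     return solve(new_N, new_K)
-- ===== SOURCE B (Python) =====
-- def solve(N, K):
--     # Closed form: each recursion step of the reference maps N -> (N - K%2)//2 and
--     # K -> K//2; composing the floor divisions gives the final N directly.
--     t = K.bit_length() - 1
--     p = 2 ** t
--     return _base((N - K + p) // p)
--
-- def _base(Nf):
--     h = Nf // 2
--     return (h, h) if Nf % 2 else (h, h - 1)
-- ===== Notes on version B (the rewrite author's own statement) =====
-- stated objective: faster
-- what changed: Replaced the per-bit recursion by a closed form: the composed floor divisions give the final N as (N - K + 2**t)//2**t with t = K.bit_length()-1, then the K==1 base case is applied once.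
import Mathlib
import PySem

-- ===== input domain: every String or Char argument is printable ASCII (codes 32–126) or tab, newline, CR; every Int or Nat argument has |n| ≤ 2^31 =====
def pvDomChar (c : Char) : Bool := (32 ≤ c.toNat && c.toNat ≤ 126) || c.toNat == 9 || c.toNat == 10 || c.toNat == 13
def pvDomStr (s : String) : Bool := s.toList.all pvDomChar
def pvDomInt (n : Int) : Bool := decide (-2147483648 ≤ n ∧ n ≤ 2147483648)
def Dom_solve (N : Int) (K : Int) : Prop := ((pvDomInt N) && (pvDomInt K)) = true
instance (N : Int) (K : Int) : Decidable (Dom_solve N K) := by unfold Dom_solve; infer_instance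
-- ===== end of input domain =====

-- B replaces A's per-bit recursion by a single closed-form computation of the final N.

-- ===== PORT A =====
-- Python's four independent `if` statements are exhaustive and mutually exclusive,
-- so the chain below assigns new_N/new_K exactly as the Python does.
-- The `K ≤ 0` guard only makes the port total: Python recurses forever there
-- (K//2 never reaches 1); those inputs are excluded by Pre_solve.
def solve (N : Int) (K : Int) : Int × Int :=
  if K = 1 then
    if PySem.Int.mod N 2 ≠ 0 then
      (PySem.Int.floordiv N 2, PySem.Int.floordiv N 2)
    else
      (PySem.Int.floordiv N 2, PySem.Int.floordiv N 2 - 1)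
  else if K ≤ 0 then (0, 0)
  else
    let evN := PySem.Int.mod N 2 = 0
    let evK := PySem.Int.mod K 2 = 0
    let st :=
      if evN ∧ ¬ evK then (PySem.Int.floordiv N 2 - 1, PySem.Int.floordiv K 2)
      else if ¬ evN ∧ ¬ evK then (PySem.Int.floordiv N 2, PySem.Int.floordiv K 2)
      else if evN ∧ evK then (PySem.Int.floordiv N 2, PySem.Int.floordiv K 2)
      else (PySem.Int.floordiv N 2, PySem.Int.floordiv K 2)
    solve st.1 st.2
termination_by K.toNat
decreasing_by
  all_goals
    have h2 : PySem.Int.floordiv K 2 = K / 2 := PySem.Int.floordiv_eq_ediv_of_pos (by omega)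
    simp only [h2]
    split_ifs <;> simp only [] <;> omega

-- ===== PORT B =====
-- bit_length() is PySem.Int.bitLength; exact for K >= 1, which Pre_solve guarantees
-- (Python's t is an int; t >= 0 on Pre_, so Nat here). `_base` ports Source B's helper.
def altBase (Nf : Int) : Int × Int :=
  let h := PySem.Int.floordiv Nf 2
  if PySem.Int.mod Nf 2 ≠ 0 then (h, h) else (h, h - 1)

def solve_alt (N : Int) (K : Int) : Int × Int :=
  altBase (PySem.Int.floordiv (N - K + 2 ^ (PySem.Int.bitLength K - 1))
                              (2 ^ (PySem.Int.bitLength K - 1)))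

-- ===== PRECONDITION & SPEC =====
-- For K ≤ 0 the Python A never returns (infinite recursion: K//2 stays ≤ 0), so only K ≥ 1 is claimed.
def Pre_solve (_N : Int) (K : Int) : Prop := 1 ≤ K
instance (N : Int) (K : Int) : Decidable (Pre_solve N K) := by unfold Pre_solve; infer_instance
def pvWitness_solve : Int × Int := (14, 10)
def Spec_solve (N : Int) (K : Int) (out : Int × Int) : Prop := out = solve_alt N K
instance (N : Int) (K : Int) (out : Int × Int) : Decidable (Spec_solve N K out) := by unfold Spec_solve; infer_instance

-- ===== CLAIM (what is proved, stated in full; the proofs are below) =====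
def Claim_equal_solve : Prop := ∀ (N : Int) (K : Int), Dom_solve N K → Pre_solve N K → Spec_solve N K (solve N K)

-- ===== LEMMAS AND PROOFS =====

-- One recursion step of A sends N to (N - K%2)//2 (uniformly over the four parity cases).
lemma stepN_eq (N K : Int) :
    (if PySem.Int.mod N 2 = 0 ∧ ¬ PySem.Int.mod K 2 = 0 then PySem.Int.floordiv N 2 - 1
     else PySem.Int.floordiv N 2)
    = PySem.Int.floordiv (N - PySem.Int.mod K 2) 2 := by
  have hN := PySem.Int.floordiv_eq_ediv_of_pos (a := N) (b := 2) (by omega)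
  have hN' := PySem.Int.floordiv_eq_ediv_of_pos (a := N - PySem.Int.mod K 2) (b := 2) (by omega)
  have hmN := PySem.Int.mod_eq_emod_of_pos (a := N) (b := 2) (by omega)
  have hmK := PySem.Int.mod_eq_emod_of_pos (a := K) (b := 2) (by omega)
  split_ifs with h
  · rw [hN, hN', hmK]
    omega
  · rw [hN, hN', hmK]
    rw [hmN, hmK] at h
    omega

-- B's closed form absorbs one halving step: solve_alt ((N - K%2)//2) (K//2) = solve_alt N K for K ≥ 2.
lemma alt_step (N K : Int) (hK : 2 ≤ K) :
    solve_alt (PySem.Int.floordiv (N - PySem.Int.mod K 2) 2) (PySem.Int.floordiv K 2) = solve_alt N K := by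
  have hfd : PySem.Int.floordiv K 2 = K / 2 := PySem.Int.floordiv_eq_ediv_of_pos (by omega)
  have hmd : PySem.Int.mod K 2 = K % 2 := PySem.Int.mod_eq_emod_of_pos (by omega)
  have hbl : PySem.Int.bitLength K = PySem.Int.bitLength (PySem.Int.floordiv K 2) + 1 :=
    PySem.Int.bitLength_of_pos (by omega)
  have hK2pos : (1:Int) ≤ K / 2 := by omega
  have hblpos : 1 ≤ PySem.Int.bitLength (PySem.Int.floordiv K 2) := by
    rcases Nat.eq_zero_or_pos (PySem.Int.bitLength (PySem.Int.floordiv K 2)) with h0 | h0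
    · exfalso
      have := PySem.Int.lt_two_pow_bitLength (PySem.Int.floordiv K 2)
      rw [h0] at this
      simp at this
      omega
    · omega
  unfold solve_alt
  rw [hbl, hfd, hmd]
  set t' : Nat := PySem.Int.bitLength (K / 2) - 1 with ht'
  have hblpos' : 1 ≤ PySem.Int.bitLength (K / 2) := by rw [hfd] at hblpos; omega
  have htt : PySem.Int.bitLength (K / 2) + 1 - 1 = t' + 1 := by omega
  rw [htt]
  congr 1
  have hp' : (0:Int) < 2 ^ t' := by positivity
  rw [PySem.Int.floordiv_eq_ediv_of_pos (b := (2:Int) ^ t') hp',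
      PySem.Int.floordiv_eq_ediv_of_pos (b := (2:Int) ^ (t' + 1)) (by positivity),
      PySem.Int.floordiv_eq_ediv_of_pos (b := (2:Int)) (by omega)]
  have key : (N - K % 2) / 2 - K / 2 + 2 ^ t' = (N - K + 2 ^ (t' + 1)) / 2 := by
    have h2 : N - K + 2 ^ (t' + 1) = (N - K % 2) + (- (K / 2) + 2 ^ t') * 2 := by
      rw [pow_succ]
      omega
    rw [h2, Int.add_mul_ediv_right _ _ (by omega : (2:Int) ≠ 0)]
    omega
  rw [key, Int.ediv_ediv_of_nonneg (by omega), ← pow_succ']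

-- Main equivalence, by strong induction on K.
lemma solve_eq_alt : ∀ (n : Nat) (N K : Int), K.toNat ≤ n → 1 ≤ K → solve N K = solve_alt N K := by
  intro n
  induction n with
  | zero => intro N K h hK; omega
  | succ m ih =>
    intro N K h hK
    by_cases h1 : K = 1
    · subst h1
      have hbl : PySem.Int.bitLength (1:Int) = 1 := by decide
      have hNf : PySem.Int.floordiv (N - 1 + 2 ^ (PySem.Int.bitLength (1:Int) - 1))
                   (2 ^ (PySem.Int.bitLength (1:Int) - 1)) = N := by
        rw [hbl]
        norm_num [PySem.Int.floordiv_eq_ediv_of_pos (by omega : (0:Int) < 1)]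
      unfold solve solve_alt
      rw [hNf, if_pos rfl]
      unfold altBase
      rfl
    · have hK2 : 2 ≤ K := by omega
      rw [show solve N K =
            solve (if PySem.Int.mod N 2 = 0 ∧ ¬ PySem.Int.mod K 2 = 0
                   then PySem.Int.floordiv N 2 - 1 else PySem.Int.floordiv N 2)
                  (PySem.Int.floordiv K 2) by
        conv_lhs => unfold solve
        rw [if_neg h1, if_neg (by omega)]
        simp only []
        split_ifs <;> rfl]
      have hfd : PySem.Int.floordiv K 2 = K / 2 := PySem.Int.floordiv_eq_ediv_of_pos (by omega)
      rw [ih _ _ (by rw [hfd]; omega) (by rw [hfd]; omega)]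
      rw [stepN_eq]
      exact alt_step N K hK2

-- ===== VERDICT (by name: the statement is the Claim_ definition above) =====
theorem solve_spec : Claim_equal_solve := by
  intro N K _ hPre
  unfold Spec_solve
  exact solve_eq_alt K.toNat N K le_rfl hPre
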